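-- pv_equiv track=rewrite | github.com/mvic89/motorcycle-booking | convert_osm_to_json.py | build_countries_dict
-- ===== SOURCE A (Python) =====
-- from collections import defaultdict
-- from typing import Dict, List, Any
--
-- def build_countries_dict(shops: List[Dict[str, Any]]) -> Dict[str, List[str]]:
--     """
--     Build the countries dictionary with cities.
--     Format: {"Country": ["City1", "City2", ...]}
--     """
--     countries = defaultdict(set)
--
--     for shop in shops:
--         city_field = shop.get('city', '')
--         if ', ' in city_field:
--             parts = city_field.split(', ')
--             city = parts[0].strip()
--             country = parts[-1].strip()
--             if city and country:
--                 countries[country].add(city)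
--
--     # Convert sets to sorted lists
--     return {country: sorted(list(cities)) for country, cities in sorted(countries.items())}
-- ===== SOURCE B (Python) =====
-- def _pair(shop):
--     field = shop.get('city', '')
--     if ', ' not in field:
--         return None
--     parts = field.split(', ')
--     city, country = parts[0].strip(), parts[-1].strip()
--     return (country, city) if city and country else None
--
--
-- def build_countries_dict(shops):
--     pairs = [p for p in map(_pair, shops) if p is not None]
--     return {c: sorted({city for k, city in pairs if k == c})
--             for c in sorted({k for k, _ in pairs})}
-- ===== Notes on version B (the rewrite author's own statement) =====
-- stated objective: alternative
-- what changed: Replaces the incrementally maintained defaultdict-of-sets with a flat extraction of (country, city) pairs followed by comprehensions: sorted distinct countries, and per country a filtered set of its cities, sorted.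
import Mathlib
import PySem

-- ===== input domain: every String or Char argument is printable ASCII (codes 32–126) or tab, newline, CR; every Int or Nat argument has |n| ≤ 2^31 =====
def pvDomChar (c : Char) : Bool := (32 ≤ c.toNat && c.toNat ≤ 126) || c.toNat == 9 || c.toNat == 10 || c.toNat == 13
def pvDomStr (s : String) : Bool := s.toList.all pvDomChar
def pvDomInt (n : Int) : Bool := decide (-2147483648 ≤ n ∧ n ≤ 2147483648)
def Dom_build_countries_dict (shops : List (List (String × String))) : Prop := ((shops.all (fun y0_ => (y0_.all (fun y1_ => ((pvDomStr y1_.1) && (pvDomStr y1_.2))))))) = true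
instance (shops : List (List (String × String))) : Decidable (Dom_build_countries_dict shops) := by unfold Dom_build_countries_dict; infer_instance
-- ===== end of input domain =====

-- B replaces A's incrementally maintained defaultdict-of-sets by a flat extraction of
-- (country, city) pairs plus comprehensions over it (objective: alternative, same cost class).

-- ===== PORT A =====
-- 'sorted(countries.items())' compares (key, set) tuples, but dict keys are distinct so the
-- comparison never reaches the set: ported as a sort keyed on the first component.
-- 'parts[0]'/'parts[-1]' are ported as headD/getLastD: str.split with a nonempty separator
-- never returns an empty list, so the defaults are unreachable and this is exact.
def build_countries_dict (shops : List (List (String × String))) : List (String × List String) :=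
  let countries : PySem.Dict String (PySem.Set String) :=
    shops.foldl (fun d shop =>
      let city_field := (PySem.Dict.mk shop).getD "city" ""
      if PySem.Str.isIn ", " city_field then
        let parts := (PySem.Str.split? city_field ", ").getD []
        let city := PySem.Str.strip (parts.headD "")
        let country := PySem.Str.strip (parts.getLastD "")
        if city ≠ "" ∧ country ≠ "" then
          d.modify country PySem.Set.empty (fun s => PySem.Set.add s city)
        else d
      else d) PySem.Dict.empty
  (PySem.List.sorted countries.items (fun p => p.1)).map
    (fun p => (p.1, PySem.List.sorted p.2 (fun c => c)))

-- ===== PORT B =====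
-- helper = Source B's _pair
def pvPair? (shop : List (String × String)) : Option (String × String) :=
  let field := (PySem.Dict.mk shop).getD "city" ""
  if PySem.Str.isIn ", " field then
    let parts := (PySem.Str.split? field ", ").getD []
    let city := PySem.Str.strip (parts.headD "")
    let country := PySem.Str.strip (parts.getLastD "")
    if city ≠ "" ∧ country ≠ "" then some (country, city) else none
  else none

def build_countries_dict_alt (shops : List (List (String × String))) : List (String × List String) :=
  let pairs := shops.filterMap pvPair?
  (PySem.List.sorted (PySem.Set.ofList (pairs.map (fun p => p.1))) (fun c => c)).map
    (fun c => (c, PySem.List.sorted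
        (PySem.Set.ofList ((pairs.filter (fun p => p.1 == c)).map (fun p => p.2))) (fun x => x)))

-- ===== PRECONDITION & SPEC =====
def Spec_build_countries_dict (shops : List (List (String × String))) (out : List (String × List String)) : Prop := out = build_countries_dict_alt shops
instance (shops : List (List (String × String))) (out : List (String × List String)) : Decidable (Spec_build_countries_dict shops out) := by unfold Spec_build_countries_dict; infer_instance

-- ===== CLAIM (what is proved, stated in full; the proofs are below) =====
def Claim_equal_build_countries_dict : Prop := ∀ (shops : List (List (String × String))), Dom_build_countries_dict shops → Spec_build_countries_dict shops (build_countries_dict shops)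

-- ===== LEMMAS AND PROOFS =====

-- A's loop body (zeta-reduced), phrased through B's extraction helper.
lemma pvStepA_eq (d : PySem.Dict String (PySem.Set String)) (shop : List (String × String)) :
    (if PySem.Str.isIn ", " ((PySem.Dict.mk shop).getD "city" "") then
        if PySem.Str.strip (((PySem.Str.split? ((PySem.Dict.mk shop).getD "city" "") ", ").getD []).headD "") ≠ "" ∧
            PySem.Str.strip (((PySem.Str.split? ((PySem.Dict.mk shop).getD "city" "") ", ").getD []).getLastD "") ≠ "" then
          d.modify (PySem.Str.strip (((PySem.Str.split? ((PySem.Dict.mk shop).getD "city" "") ", ").getD []).getLastD ""))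
            PySem.Set.empty
            (fun s => PySem.Set.add s (PySem.Str.strip (((PySem.Str.split? ((PySem.Dict.mk shop).getD "city" "") ", ").getD []).headD "")))
        else d
      else d)
    = (pvPair? shop).elim d (fun p => d.modify p.1 PySem.Set.empty (fun s => PySem.Set.add s p.2)) := by
  unfold pvPair?
  dsimp only
  split
  · split <;> rfl
  · rfl

-- a fold whose step filters through an Option helper is a fold over the filterMap
lemma pvFoldl_filterMap {β γ δ : Type} (g : β → Option γ) (f : δ → γ → δ) :
    ∀ (l : List β) (d : δ),
      l.foldl (fun d x => (g x).elim d (fun p => f d p)) d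
        = (l.filterMap g).foldl f d := by
  intro l
  induction l with
  | nil => intro d; rfl
  | cons x t ih =>
      intro d
      cases h : g x <;> simp [h, ih]

-- value of the grouping fold at any key
lemma pvGetD_fold (l : List (String × String)) :
    ∀ (d : PySem.Dict String (PySem.Set String)) (c : String),
      (l.foldl (fun d p => d.modify p.1 PySem.Set.empty (fun s => PySem.Set.add s p.2)) d).getD c PySem.Set.empty
        = PySem.Set.update (d.getD c PySem.Set.empty) ((l.filter (fun p => p.1 == c)).map (fun p => p.2)) := by
  induction l with
  | nil => intro d c; simp [PySem.Set.update]
  | cons p t ih =>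
      intro d c
      rw [List.foldl_cons, ih, List.filter_cons]
      by_cases h : p.1 = c
      · subst h
        rw [PySem.Dict.getD_modify]
        simp [PySem.Set.update]
      · have h' : (p.1 == c) = false := by simp [h]
        rw [PySem.Dict.getD_modify, if_neg (fun hc => h hc.symm)]
        simp [h']

set_option maxHeartbeats 1000000 in
theorem build_countries_dict_spec : Claim_equal_build_countries_dict := by
  intro shops _
  unfold Spec_build_countries_dict build_countries_dict build_countries_dict_alt
  dsimp only
  have hcongr := PySem.List.foldl_congr_mem shops
      (fun d shop =>
        if PySem.Str.isIn ", " ((PySem.Dict.mk shop).getD "city" "") then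
          if PySem.Str.strip (((PySem.Str.split? ((PySem.Dict.mk shop).getD "city" "") ", ").getD []).headD "") ≠ "" ∧
              PySem.Str.strip (((PySem.Str.split? ((PySem.Dict.mk shop).getD "city" "") ", ").getD []).getLastD "") ≠ "" then
            d.modify (PySem.Str.strip (((PySem.Str.split? ((PySem.Dict.mk shop).getD "city" "") ", ").getD []).getLastD ""))
              PySem.Set.empty
              (fun s => PySem.Set.add s (PySem.Str.strip (((PySem.Str.split? ((PySem.Dict.mk shop).getD "city" "") ", ").getD []).headD "")))
          else d
        else d)
      (fun d shop => (pvPair? shop).elim d (fun p => d.modify p.1 PySem.Set.empty (fun s => PySem.Set.add s p.2)))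
      PySem.Dict.empty
      (by intro acc x _; exact pvStepA_eq acc x)
  rw [hcongr]
  rw [pvFoldl_filterMap pvPair? (fun d p => d.modify p.1 PySem.Set.empty (fun s => PySem.Set.add s p.2)) shops PySem.Dict.empty]
  set pairs := shops.filterMap pvPair?
  set D := pairs.foldl (fun d p => d.modify p.1 PySem.Set.empty (fun s => PySem.Set.add s p.2))
      PySem.Dict.empty with hD
  have hkeys : D.keys = PySem.Set.ofList (pairs.map (fun p => p.1)) := by
    rw [hD, PySem.Dict.keys_foldl_modify_key pairs (fun p => p.1) PySem.Set.empty
      (fun _ p s => PySem.Set.add s p.2) PySem.Dict.empty]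
    simp [PySem.Dict.keys_empty, PySem.Set.update, PySem.Set.ofList_eq_foldl]
  have hnodup : D.keys.Nodup := by
    rw [hkeys]; exact PySem.Set.nodup_ofList _
  have hget : ∀ c, D.getD c PySem.Set.empty
      = PySem.Set.ofList ((pairs.filter (fun p => p.1 == c)).map (fun p => p.2)) := by
    intro c
    rw [hD, pvGetD_fold]
    simp [PySem.Dict.getD_empty, PySem.Set.update, PySem.Set.ofList_eq_foldl]
  have hitems : D.items = D.keys.map (fun k => (k, D.getD k PySem.Set.empty)) :=
    PySem.Dict.items_eq_map_keys D hnodup PySem.Set.empty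
  -- the sort of the items list, keyed on the country, is the map over the sorted key set
  have hsorted : PySem.List.sorted D.items (fun p => p.1)
      = (PySem.List.sorted D.keys (fun c => c)).map (fun k => (k, D.getD k PySem.Set.empty)) := by
    apply PySem.List.sorted_eq_of_perm_of_pairwise_lt
    · rw [hitems]
      exact List.Perm.map _ (PySem.List.sorted_perm D.keys (fun c => c) false)
    · have h1 : List.Pairwise (fun a b => a < b) (PySem.List.sorted D.keys (fun c => c)) := by
        rw [hkeys]; exact PySem.List.sorted_ofList_pairwise_lt _
      exact List.Pairwise.map (fun k => (k, D.getD k PySem.Set.empty))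
        (S := fun a b : String × PySem.Set String => a.1 < b.1) (fun _ _ h => h) h1
  rw [hsorted, List.map_map, hkeys]
  apply List.map_congr_left
  intro k _
  dsimp only [Function.comp]
  rw [hget k]

-- ===== VERDICT (by name: the statement is the Claim_ definition above) =====
-- (verdict theorem is above: build_countries_dict_spec)
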